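-- pv_equiv track=rewrite | github.com/washi4/reading-hub | .github/skills/youtube-clipper/scripts/vtt_to_shadow_srt.py | dedup_consecutive
-- ===== SOURCE A (Python) =====
-- def dedup_consecutive(blocks):
--     """
--     连续重复块去重
--
--     YouTube 手动上传字幕常见"逐行展开"模式：同一句话在连续 3-5 个块中
--     重复出现，每块时间范围递进。去重后只保留一个条目，取第一次出现的
--     start 和最后一次出现的 end。
--
--     示例:
--         输入:  5 个块都是 "The screen door keeps bugs outside."
--         输出:  1 个块 "The screen door keeps bugs outside." (合并时间)
--     """
--     if not blocks:
--         return []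
--
--     deduped = []
--     current = blocks[0].copy()
--
--     for block in blocks[1:]:
--         if block['text'] == current['text']:
--             # 相同文本，扩展时间范围
--             current['end'] = max(current['end'], block['end'])
--         else:
--             deduped.append(current)
--             current = block.copy()
--
--     deduped.append(current)
--     return deduped
-- ===== SOURCE B (Python) =====
-- def dedup_consecutive(blocks):
--     """Run-splitting rewrite: cut the list into maximal consecutive same-text runs
--     and emit one block per run (first block's fields; when the run actually merged
--     anything, its 'end' becomes the max end over the run)."""
--     result = []
--     i = 0
--     n = len(blocks)
--     while i < n:
--         j = i + 1
--         while j < n and blocks[j]['text'] == blocks[i]['text']: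
--             j += 1
--         merged = blocks[i].copy()
--         if j > i + 1:
--             merged['end'] = max(b['end'] for b in blocks[i:j])
--         result.append(merged)
--         i = j
--     return result
-- ===== Notes on version B (the rewrite author's own statement) =====
-- stated objective: alternative
-- what changed: Replaces A's single-pass accumulator (carry a mutable 'current' block, flush on text change) by a run-splitting decomposition: find each maximal consecutive same-text run with an index scan, then emit one block per run, setting its 'end' to the max over the run when the run merged anything.
import Mathlib
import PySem

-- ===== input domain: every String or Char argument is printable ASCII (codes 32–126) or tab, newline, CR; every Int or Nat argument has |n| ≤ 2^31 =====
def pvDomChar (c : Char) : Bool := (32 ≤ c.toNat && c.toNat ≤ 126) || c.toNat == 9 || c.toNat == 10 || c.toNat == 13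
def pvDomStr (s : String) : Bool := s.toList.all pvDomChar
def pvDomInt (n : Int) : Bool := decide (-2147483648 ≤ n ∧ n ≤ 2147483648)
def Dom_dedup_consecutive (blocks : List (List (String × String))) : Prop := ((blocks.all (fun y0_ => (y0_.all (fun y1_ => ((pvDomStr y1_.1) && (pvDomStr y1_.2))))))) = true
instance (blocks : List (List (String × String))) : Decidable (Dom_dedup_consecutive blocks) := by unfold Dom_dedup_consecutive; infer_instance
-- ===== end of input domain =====

-- B replaces A's carry-a-current-block accumulator pass by a run-splitting decomposition
-- (maximal consecutive same-text runs, one block per run); equal cost, no speed claim.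

-- ===== PORT A =====
-- A: fold over blocks[1:] with state (deduped, current); on equal text extend current's
-- 'end' by max, else flush current and restart from a copy of the block.
def dedup_consecutive (blocks : List (List (String × String))) : List (List (String × String)) :=
  match blocks with
  | [] => []
  | b0 :: rest =>
    let st := rest.foldl
      (fun (st : List (List (String × String)) × List (String × String)) block =>
        if (PySem.Dict.mk block).get? "text" = (PySem.Dict.mk st.2).get? "text" then
          -- current['end'] = max(current['end'], block['end'])  (Python max keeps the first on ties)
          let ce := (PySem.Dict.mk st.2).getD "end" ""
          let be := (PySem.Dict.mk block).getD "end" ""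
          (st.1, ((PySem.Dict.mk st.2).insert "end" (if ce < be then be else ce)).items)
        else
          (st.1 ++ [st.2], block))
      ([], b0)
    st.1 ++ [st.2]

-- ===== PORT B =====
-- B: split off the maximal run of blocks whose 'text' equals the first block's; emit the
-- first block, with 'end' := max of the run's ends when the run merged anything; recurse.
def dedup_consecutive_alt : List (List (String × String)) → List (List (String × String))
  | [] => []
  | b :: rest =>
    let t := (PySem.Dict.mk b).get? "text"
    let run := rest.takeWhile (fun c => (PySem.Dict.mk c).get? "text" == t)
    let merged :=
      if run.isEmpty then b
      else ((PySem.Dict.mk b).insert "end"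
        (run.foldl (fun m c => let e := (PySem.Dict.mk c).getD "end" ""; if m < e then e else m)
          ((PySem.Dict.mk b).getD "end" ""))).items
    merged :: dedup_consecutive_alt (rest.dropWhile (fun c => (PySem.Dict.mk c).get? "text" == t))
termination_by l => l.length
decreasing_by exact Nat.lt_succ_of_le (List.length_dropWhile_le _ _)

-- ===== PRECONDITION & SPEC =====
-- Pre_ is exactly the set of inputs on which the Python A returns (no KeyError): with two or
-- more blocks every block needs a 'text' key, and both members of every adjacent same-text
-- pair need an 'end' key; association lists with duplicate keys are also excluded, since
-- they represent no Python dict.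
def Pre_dedup_consecutive (blocks : List (List (String × String))) : Prop :=
  (∀ b ∈ blocks, (b.map Prod.fst).Nodup) ∧
  (2 ≤ blocks.length → ∀ b ∈ blocks, "text" ∈ b.map Prod.fst) ∧
  ∀ p ∈ blocks.zip blocks.tail,
    ((PySem.Dict.mk p.1).get? "text" = (PySem.Dict.mk p.2).get? "text" →
      "end" ∈ p.1.map Prod.fst ∧ "end" ∈ p.2.map Prod.fst)
instance (blocks : List (List (String × String))) : Decidable (Pre_dedup_consecutive blocks) := by
  unfold Pre_dedup_consecutive; infer_instance

def pvWitness_dedup_consecutive : (List (List (String × String))) :=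
  [[("text", "a"), ("end", "1")], [("text", "a"), ("end", "2")], [("text", "b"), ("end", "3")]]

def Spec_dedup_consecutive (blocks : List (List (String × String))) (out : List (List (String × String))) : Prop := out = dedup_consecutive_alt blocks
instance (blocks : List (List (String × String))) (out : List (List (String × String))) : Decidable (Spec_dedup_consecutive blocks out) := by unfold Spec_dedup_consecutive; infer_instance

-- ===== CLAIM (what is proved, stated in full; the proofs are below) =====
def Claim_equal_dedup_consecutive : Prop := ∀ (blocks : List (List (String × String))), Dom_dedup_consecutive blocks → Pre_dedup_consecutive blocks → Spec_dedup_consecutive blocks (dedup_consecutive blocks)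

-- ===== LEMMAS AND PROOFS =====

-- A's loop, written as structural recursion on the remaining blocks with the current block as state.
def pvGoA (cur : List (String × String)) : List (List (String × String)) → List (List (String × String))
  | [] => [cur]
  | blk :: rest =>
    if (PySem.Dict.mk blk).get? "text" = (PySem.Dict.mk cur).get? "text" then
      let ce := (PySem.Dict.mk cur).getD "end" ""
      let be := (PySem.Dict.mk blk).getD "end" ""
      pvGoA (((PySem.Dict.mk cur).insert "end" (if ce < be then be else ce)).items) rest
    else cur :: pvGoA blk rest

lemma pvAltNil : dedup_consecutive_alt [] = [] := by
  rw [dedup_consecutive_alt]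

lemma pvAltCons (b : List (String × String)) (rest : List (List (String × String))) :
    dedup_consecutive_alt (b :: rest) =
      (let run := rest.takeWhile (fun c => (PySem.Dict.mk c).get? "text" == (PySem.Dict.mk b).get? "text")
      if run.isEmpty then b
      else ((PySem.Dict.mk b).insert "end"
        (run.foldl (fun m c => let e := (PySem.Dict.mk c).getD "end" ""; if m < e then e else m)
          ((PySem.Dict.mk b).getD "end" ""))).items) ::
      dedup_consecutive_alt
        (rest.dropWhile (fun c => (PySem.Dict.mk c).get? "text" == (PySem.Dict.mk b).get? "text")) := by
  rw [dedup_consecutive_alt]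

lemma pvFoldA (rest : List (List (String × String)))
    (acc : List (List (String × String))) (cur : List (String × String)) :
    (rest.foldl
      (fun (st : List (List (String × String)) × List (String × String)) block =>
        if (PySem.Dict.mk block).get? "text" = (PySem.Dict.mk st.2).get? "text" then
          let ce := (PySem.Dict.mk st.2).getD "end" ""
          let be := (PySem.Dict.mk block).getD "end" ""
          (st.1, ((PySem.Dict.mk st.2).insert "end" (if ce < be then be else ce)).items)
        else
          (st.1 ++ [st.2], block))
      (acc, cur)).1 ++
    [(rest.foldl
      (fun (st : List (List (String × String)) × List (String × String)) block =>
        if (PySem.Dict.mk block).get? "text" = (PySem.Dict.mk st.2).get? "text" then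
          let ce := (PySem.Dict.mk st.2).getD "end" ""
          let be := (PySem.Dict.mk block).getD "end" ""
          (st.1, ((PySem.Dict.mk st.2).insert "end" (if ce < be then be else ce)).items)
        else
          (st.1 ++ [st.2], block))
      (acc, cur)).2] = acc ++ pvGoA cur rest := by
  induction rest generalizing acc cur with
  | nil => simp [pvGoA]
  | cons blk rest ih =>
    simp only [List.foldl_cons, pvGoA]
    by_cases h : (PySem.Dict.mk blk).get? "text" = (PySem.Dict.mk cur).get? "text"
    · simp only [h, if_true]
      exact ih _ _
    · rw [if_neg h, if_neg h, ih, List.append_assoc]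
      rfl

-- pushing one more 'end' := M insert into the head block only extends the fold seed of its run
lemma pvAltInsertHead (d : PySem.Dict String String) (M : String)
    (rest : List (List (String × String))) :
    dedup_consecutive_alt ((d.insert "end" M).items :: rest) =
      (d.insert "end"
        ((rest.takeWhile (fun c => (PySem.Dict.mk c).get? "text" == d.get? "text")).foldl
          (fun m c => let e := (PySem.Dict.mk c).getD "end" ""; if m < e then e else m) M)).items ::
      dedup_consecutive_alt
        (rest.dropWhile (fun c => (PySem.Dict.mk c).get? "text" == d.get? "text")) := by
  rw [pvAltCons]
  have hmk : PySem.Dict.mk ((d.insert "end" M).items) = d.insert "end" M := rfl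
  have htxt : (PySem.Dict.mk ((d.insert "end" M).items)).get? "text" = d.get? "text" := by
    rw [hmk]
    exact PySem.Dict.get?_insert_of_ne d M (by decide)
  simp only [htxt, hmk]
  by_cases hrun : (rest.takeWhile
      (fun c => (PySem.Dict.mk c).get? "text" == d.get? "text")) = []
  · simp only [hrun, List.isEmpty_nil, if_true, List.foldl_nil]
  · have : (rest.takeWhile
        (fun c => (PySem.Dict.mk c).get? "text" == d.get? "text")).isEmpty = false := by
      simpa [List.isEmpty_iff] using hrun
    simp only [this, Bool.false_eq_true, if_false,
      PySem.Dict.getD_insert_self, PySem.Dict.insert_insert_self]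

lemma pvMain (rest : List (List (String × String))) (cur : List (String × String)) :
    pvGoA cur rest = dedup_consecutive_alt (cur :: rest) := by
  induction rest generalizing cur with
  | nil =>
    rw [pvAltCons]
    simp [pvGoA, pvAltNil]
  | cons blk rest ih =>
    rw [pvGoA]
    by_cases h : (PySem.Dict.mk blk).get? "text" = (PySem.Dict.mk cur).get? "text"
    · rw [if_pos h, ih, pvAltInsertHead, pvAltCons (b := cur)]
      have hb : ((PySem.Dict.mk blk).get? "text" == (PySem.Dict.mk cur).get? "text") = true := by
        simpa using h
      simp only [List.takeWhile_cons, List.dropWhile_cons, hb, if_true, List.isEmpty_cons,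
        Bool.false_eq_true, if_false, List.foldl_cons]
    · rw [if_neg h, ih, pvAltCons (b := cur)]
      have hb : ((PySem.Dict.mk blk).get? "text" == (PySem.Dict.mk cur).get? "text") = false := by
        simpa using h
      simp only [List.takeWhile_cons, List.dropWhile_cons, hb, Bool.false_eq_true, if_false,
        List.isEmpty_nil, if_true]

-- ===== VERDICT (by name: the statement is the Claim_ definition above) =====
theorem dedup_consecutive_spec : Claim_equal_dedup_consecutive := by
  intro blocks _ _
  unfold Spec_dedup_consecutive
  match blocks with
  | [] => rw [pvAltNil]; rfl
  | b0 :: rest =>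
    rw [dedup_consecutive]
    have hf := pvFoldA rest [] b0
    simp only [List.nil_append] at hf
    rw [hf, pvMain rest b0]
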